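-- pv_equiv track=rewrite | github.com/KvaziDeveloper1703/CodeWars_Python | level_5/CW_5_5.py | simplify_directions
-- ===== SOURCE A (Python) =====
-- def simplify_directions(directions):
--     opposite = {"NORTH": "SOUTH", "SOUTH": "NORTH", "EAST": "WEST", "WEST": "EAST"}
--     stack = []
--
--     for direction in directions:
--         if stack and stack[-1] == opposite[direction]:
--             stack.pop()
--         else:
--             stack.append(direction)
--
--     return stack
-- ===== SOURCE B (Python) =====
-- def simplify_directions(directions):
--     opposite = {"NORTH": "SOUTH", "SOUTH": "NORTH", "EAST": "WEST", "WEST": "EAST"}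
--     result = list(directions)
--     while True:
--         for i in range(len(result) - 1):
--             if result[i + 1] == opposite[result[i]]:
--                 del result[i:i + 2]
--                 break
--         else:
--             return result
-- ===== Notes on version B (the rewrite author's own statement) =====
-- stated objective: alternative
-- what changed: Replaces the single-pass stack with a fixpoint reduction that repeatedly scans for the first adjacent opposite pair, deletes both, and restarts until a full pass finds no pair; equal by confluence of adjacent cancellation.
-- outside the precondition, e.g. on simplify_directions(['FOO', 'NORTH', 'SOUTH']): A returns ['FOO'], B raises KeyError; on simplify_directions(['abc', 'NORTH']): A returns ['abc', 'NORTH'], B raises KeyError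
import Mathlib
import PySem

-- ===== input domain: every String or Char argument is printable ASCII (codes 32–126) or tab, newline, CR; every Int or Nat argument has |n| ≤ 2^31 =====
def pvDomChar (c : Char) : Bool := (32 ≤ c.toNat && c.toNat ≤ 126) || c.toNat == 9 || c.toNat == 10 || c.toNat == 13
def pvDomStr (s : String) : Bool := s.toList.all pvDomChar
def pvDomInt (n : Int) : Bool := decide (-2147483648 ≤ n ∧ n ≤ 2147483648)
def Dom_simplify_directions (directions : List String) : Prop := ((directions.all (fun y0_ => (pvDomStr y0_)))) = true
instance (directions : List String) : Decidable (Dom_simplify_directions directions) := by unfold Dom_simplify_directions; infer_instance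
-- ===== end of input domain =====

-- B replaces A's single-pass stack with a repeated-scan fixpoint that deletes the first
-- adjacent opposite pair until none remains (alternative decomposition, not faster).


-- ===== PORT A =====
-- the `opposite` dict; exact on the four direction keys — any other key is a Python
-- KeyError, and all such inputs are excluded by Pre_simplify_directions below
def oppD (d : String) : String :=
  if d = "NORTH" then "SOUTH"
  else if d = "SOUTH" then "NORTH"
  else if d = "EAST" then "WEST"
  else if d = "WEST" then "EAST"
  else ""

-- the body of A's for-loop: `if stack and stack[-1] == opposite[direction]: pop else append`
def stepA (stack : List String) (direction : String) : List String :=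
  if stack ≠ [] ∧ stack.getLast? = some (oppD direction) then stack.dropLast
  else stack ++ [direction]

def simplify_directions (directions : List String) : List String :=
  directions.foldl stepA []

-- ===== PORT B =====
-- one inner `for` pass of Source B: find the first adjacent opposite pair and delete both;
-- `none` = the pass completed with no deletion
def scanStep : List String → Option (List String)
  | a :: b :: rest =>
      if b = oppD a then some rest
      else (scanStep (b :: rest)).map (a :: ·)
  | _ => none

theorem scanStep_length : ∀ (l l' : List String), scanStep l = some l' → l'.length < l.length := by
  intro l
  induction l with
  | nil => intro l' h; simp [scanStep] at h
  | cons a t ih =>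
    intro l' h
    cases t with
    | nil => simp [scanStep] at h
    | cons b rest =>
      simp only [scanStep] at h
      split at h
      · cases h; simp
      · rcases Option.map_eq_some_iff.mp h with ⟨m, hm, rfl⟩
        have := ih m hm
        simpa using Nat.succ_lt_succ this

-- the outer `while True` of Source B: repeat passes until one finds no pair
def reduceLoop (l : List String) : List String :=
  match h : scanStep l with  -- `h` is used by `decreasing_by`
  | some l' => reduceLoop l'
  | none => l
termination_by l.length
decreasing_by exact scanStep_length _ _ h

def simplify_directions_alt (directions : List String) : List String :=
  reduceLoop directions

-- ===== PRECONDITION & SPEC =====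
-- Pre_ admits every list of valid directions and every list of length ≤ 1 (where no
-- dict lookup happens); it excludes longer lists containing a token other than the four
-- directions: there A looks a token up only while its stack is non-empty, so it raises
-- KeyError in a stack-state-dependent way, and where it happens to return anyway, B's
-- pairwise lookup of the scanned tokens raises KeyError instead.
def Pre_simplify_directions (directions : List String) : Prop :=
  (directions.all (fun d => d = "NORTH" ∨ d = "SOUTH" ∨ d = "EAST" ∨ d = "WEST")) = true
    ∨ directions.length ≤ 1
instance (directions : List String) : Decidable (Pre_simplify_directions directions) := by
  unfold Pre_simplify_directions; infer_instance
def pvWitness_simplify_directions : List String := ["NORTH", "SOUTH", "EAST"]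
def Spec_simplify_directions (directions : List String) (out : List String) : Prop := out = simplify_directions_alt directions
instance (directions : List String) (out : List String) : Decidable (Spec_simplify_directions directions out) := by unfold Spec_simplify_directions; infer_instance

-- ===== CLAIM (what is proved, stated in full; the proofs are below) =====
def Claim_equal_simplify_directions : Prop := ∀ (directions : List String), Dom_simplify_directions directions → Pre_simplify_directions directions → Spec_simplify_directions directions (simplify_directions directions)

-- ===== LEMMAS AND PROOFS =====
def ValidDir (d : String) : Prop := d = "NORTH" ∨ d = "SOUTH" ∨ d = "EAST" ∨ d = "WEST"

-- the "no adjacent opposite pair" relation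
def NR (x y : String) : Prop := y ≠ oppD x

theorem opp_opp {d : String} (h : ValidDir d) : oppD (oppD d) = d := by
  rcases h with rfl | rfl | rfl | rfl <;> rfl

theorem scanStep_none_iff : ∀ (l : List String), scanStep l = none ↔ List.IsChain NR l := by
  intro l
  induction l with
  | nil => simp [scanStep]
  | cons a t ih =>
    cases t with
    | nil => simp [scanStep]
    | cons b rest =>
      constructor
      · intro h
        simp only [scanStep] at h
        split at h
        · exact absurd h (by simp)
        · rename_i hne
          refine List.isChain_cons.mpr ⟨by simpa [NR] using hne, ?_⟩
          exact (ih).mp (by simpa using h)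
      · intro hc
        rcases List.isChain_cons.mp hc with ⟨hb, hc'⟩
        have hne : ¬ b = oppD a := by
          have := hb b (by simp)
          simpa [NR] using this
        simp [scanStep, hne, (ih).mpr hc']

theorem scanStep_some_decomp : ∀ (l l' : List String), scanStep l = some l' →
    ∃ p a q, l = p ++ a :: oppD a :: q ∧ l' = p ++ q := by
  intro l
  induction l with
  | nil => intro l' h; simp [scanStep] at h
  | cons a t ih =>
    intro l' h
    cases t with
    | nil => simp [scanStep] at h
    | cons b rest =>
      simp only [scanStep] at h
      split at h
      · rename_i heq
        cases h
        exact ⟨[], a, _, by simp [heq], rfl⟩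
      · rcases Option.map_eq_some_iff.mp h with ⟨m, hm, rfl⟩
        rcases ih m hm with ⟨p, x, q, hl, hm'⟩
        exact ⟨a :: p, x, q, by simp [hl], by simp [hm']⟩

-- a fold over an irreducible suffix just appends everything
theorem foldl_irreducible : ∀ (l s : List String), (∀ d ∈ l, ValidDir d) →
    List.IsChain NR (s ++ l) → List.foldl stepA s l = s ++ l := by
  intro l
  induction l with
  | nil => intro s _ _; simp
  | cons d t ih =>
    intro s hv hc
    have hvd : ValidDir d := hv d (by simp)
    have hcond : ¬ (s ≠ [] ∧ s.getLast? = some (oppD d)) := by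
      rintro ⟨-, hlast⟩
      have hb := (List.isChain_append.mp hc).2.2 (oppD d) hlast d (by simp)
      exact hb (opp_opp hvd).symm
    have hstep : stepA s d = s ++ [d] := by simp [stepA, hcond]
    have := ih (s ++ [d]) (fun x hx => hv x (by simp [hx])) (by simpa using hc)
    simpa [hstep, List.append_assoc] using this

def StackInv (s : List String) : Prop := (∀ x ∈ s, ValidDir x) ∧ List.IsChain NR s

theorem stepA_inv {s : List String} {d : String} (hd : ValidDir d) (hs : StackInv s) :
    StackInv (stepA s d) := by
  obtain ⟨hval, hch⟩ := hs
  unfold stepA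
  split
  · exact ⟨fun x hx => hval x (List.dropLast_sublist s |>.mem hx),
      hch.prefix (List.dropLast_prefix s)⟩
  · rename_i hcond
    refine ⟨fun x hx => ?_, ?_⟩
    · rcases List.mem_append.mp hx with h | h
      · exact hval x h
      · simp at h; exact h ▸ hd
    · refine List.isChain_append.mpr ⟨hch, by simp, ?_⟩
      intro x hx y hy
      have hyd : d = y := by simpa using hy
      subst hyd
      intro hdx
      have hx' : s.getLast? = some x := hx
      apply hcond
      refine ⟨?_, ?_⟩
      · intro hnil; rw [hnil] at hx'; simp at hx'
      · rw [hx']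
        have hvx : ValidDir x := hval x (List.mem_of_getLast? hx')
        have : oppD d = x := by rw [hdx, opp_opp hvx]
        rw [this]

theorem stepA_cancel {s : List String} {a : String} (ha : ValidDir a) (hs : StackInv s) :
    stepA (stepA s a) (oppD a) = s := by
  obtain ⟨hval, hch⟩ := hs
  by_cases hcond : s ≠ [] ∧ s.getLast? = some (oppD a)
  · obtain ⟨hne, hlast⟩ := hcond
    rcases List.eq_nil_or_concat s with rfl | ⟨r, z, rfl⟩
    · exact absurd rfl hne
    · rw [List.concat_eq_append] at hval hch hne hlast ⊢
      simp only [List.getLast?_concat, Option.some.injEq] at hlast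
      subst hlast
      have h1 : stepA (r ++ [oppD a]) a = r := by
        simp [stepA]
      rw [h1]
      have hcond2 : ¬ (r ≠ [] ∧ r.getLast? = some (oppD (oppD a))) := by
        rintro ⟨-, hl2⟩
        rw [opp_opp ha] at hl2
        have hb := (List.isChain_append.mp hch).2.2 a hl2 (oppD a) (by simp)
        exact hb rfl
      simp [stepA, hcond2]
  · have h1 : stepA s a = s ++ [a] := by simp [stepA, hcond]
    rw [h1]
    have : stepA (s ++ [a]) (oppD a) = s := by
      simp [stepA, opp_opp ha]
    exact this

theorem foldl_inv : ∀ (l s : List String), (∀ d ∈ l, ValidDir d) → StackInv s →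
    StackInv (List.foldl stepA s l) := by
  intro l
  induction l with
  | nil => intro s _ h; simpa using h
  | cons d t ih =>
    intro s hv hs
    exact ih (stepA s d) (fun x hx => hv x (by simp [hx]))
      (stepA_inv (hv d (by simp)) hs)

theorem foldl_cancel (p : List String) (a : String) (q : List String)
    (ha : ValidDir a) (hp : ∀ x ∈ p, ValidDir x) :
    List.foldl stepA [] (p ++ a :: oppD a :: q) = List.foldl stepA [] (p ++ q) := by
  have hinv : StackInv (List.foldl stepA [] p) :=
    foldl_inv p [] hp ⟨by simp, by simp⟩
  rw [List.foldl_append, List.foldl_append]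
  show List.foldl stepA (stepA (stepA (List.foldl stepA [] p) a) (oppD a)) q = _
  rw [stepA_cancel ha hinv]

theorem reduceLoop_some {l l' : List String} (h : scanStep l = some l') :
    reduceLoop l = reduceLoop l' := by
  conv_lhs => rw [reduceLoop]
  split
  · rename_i l'' heq
    cases (heq.symm.trans h); rfl
  · rename_i heq
    rw [heq] at h; cases h

theorem reduceLoop_none {l : List String} (h : scanStep l = none) :
    reduceLoop l = l := by
  conv_lhs => rw [reduceLoop]
  split
  · rename_i l'' heq
    rw [heq] at h; cases h
  · rfl

theorem reduceLoop_eq (l : List String) (h : ∀ d ∈ l, ValidDir d) :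
    reduceLoop l = List.foldl stepA [] l := by
  induction l using reduceLoop.induct with
  | case1 l l' hscan ih =>
    rcases scanStep_some_decomp l l' hscan with ⟨p, a, q, rfl, rfl⟩
    have ha : ValidDir a := h a (by simp)
    have hp : ∀ x ∈ p, ValidDir x := fun x hx => h x (by simp [hx])
    have h' : ∀ d ∈ p ++ q, ValidDir d := fun d hd => by
      rcases List.mem_append.mp hd with h1 | h1
      · exact h d (by simp [h1])
      · exact h d (by simp [h1])
    rw [reduceLoop_some hscan, ih h', foldl_cancel p a q ha hp]
  | case2 l hscan =>
    rw [reduceLoop_none hscan]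
    exact (foldl_irreducible l [] h (by simpa using (scanStep_none_iff l).mp hscan)).symm

-- ===== VERDICT (by name: the statement is the Claim_ definition above) =====
theorem simplify_directions_spec : Claim_equal_simplify_directions := by
  intro directions _ hpre
  unfold Spec_simplify_directions simplify_directions simplify_directions_alt
  rcases hpre with hpre | hshort
  · have hv : ∀ d ∈ directions, ValidDir d := by
      intro d hd
      have := List.all_eq_true.mp hpre d hd
      simpa [ValidDir] using this
    exact (reduceLoop_eq directions hv).symm
  · match directions, hshort with
    | [], _ => rw [reduceLoop_none (by simp [scanStep])]; rfl
    | [d], _ =>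
      rw [reduceLoop_none (by simp [scanStep])]
      simp [stepA]
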